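-- pv_equiv track=rewrite | github.com/russellmiller49/proc_suite_deploy | app/extraction/postprocessing/clinical_guardrails.py | _has_action_near
-- ===== SOURCE A (Python) =====
-- def _has_action_near(text: str, term: str, actions: tuple[str, ...], window: int = 80) -> bool:
--     start = 0
--     while True:
--         idx = text.find(term, start)
--         if idx == -1:
--             return False
--         window_start = max(0, idx - window)
--         window_end = min(len(text), idx + len(term) + window)
--         window_text = text[window_start:window_end]
--         if any(action in window_text for action in actions):
--             return True
--         start = idx + len(term)
-- ===== SOURCE B (Python) =====
-- def _has_action_near(text: str, term: str, actions: tuple[str, ...], window: int = 80) -> bool: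
--     idx = text.find(term)
--     if idx == -1:
--         return False
--     if any(action == "" for action in actions):
--         # The empty string occurs in every window.
--         return True
--     # Index every action occurrence in the text once, as (start, end) spans.
--     occurrences = []
--     for action in actions:
--         p = text.find(action)
--         while p != -1:
--             occurrences.append((p, p + len(action)))
--             p = text.find(action, p + 1)
--     while idx != -1:
--         if any(s >= idx - window and e <= idx + len(term) + window for s, e in occurrences):
--             return True
--         idx = text.find(term, idx + len(term))
--     return False
-- ===== Notes on version B (the rewrite author's own statement) =====
-- stated objective: alternative
-- what changed: B returns False immediately when the term never occurs, answers True up front when any action is the empty string, and otherwise indexes every action occurrence in the text once as (start,end) spans and decides each term window by an arithmetic span-containment test instead of re-searching each window substring with 'in'. Pre_ restricts to nonnegative windows (the function's natural domain for a proximity radius; on negative windows A's computed slice end can go negative and Python wraps it to the end of the text) and, for an empty term, to the inputs where A terminates at all.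
-- outside the precondition, e.g. on _has_action_near('abcdefghij', 'a', ('e',), -3): A returns True, B returns False
import Mathlib
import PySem

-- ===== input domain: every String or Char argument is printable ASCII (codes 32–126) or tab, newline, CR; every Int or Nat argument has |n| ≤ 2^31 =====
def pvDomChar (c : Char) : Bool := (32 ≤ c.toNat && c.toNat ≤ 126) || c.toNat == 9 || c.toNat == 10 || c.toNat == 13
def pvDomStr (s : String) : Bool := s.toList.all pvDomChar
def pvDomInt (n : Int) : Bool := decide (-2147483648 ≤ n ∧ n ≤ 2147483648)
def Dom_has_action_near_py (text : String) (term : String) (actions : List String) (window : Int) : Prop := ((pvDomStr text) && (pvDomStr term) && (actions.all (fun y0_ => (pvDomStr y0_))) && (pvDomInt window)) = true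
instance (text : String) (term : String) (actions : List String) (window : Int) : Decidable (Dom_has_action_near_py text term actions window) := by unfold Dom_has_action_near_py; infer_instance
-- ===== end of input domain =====

-- B indexes every action occurrence in the text once as (start, end) spans and decides each
-- term window by an arithmetic span-containment test instead of re-searching each window
-- substring (objective: alternative decomposition, similar cost).

-- ===== PORT A =====
-- A's 'while True' loop; the fuel bound text.length+1 is a totality guard only: under
-- Pre_ (term ≠ "") the start strictly grows each iteration, so fuel never runs out.
def hanLoopA (t term : List Char) (acts : List (List Char)) (w : Int) : Nat → Int → Bool
  | 0, _ => false
  | f + 1, start =>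
    let idx := PySem.Chars.findFrom t term start none
    if idx = -1 then false
    else
      let ws : Int := max 0 (idx - w)
      let we : Int := min (t.length : Int) (idx + (term.length : Int) + w)
      let wt := PySem.List.slice t (some ws) (some we)
      if acts.any (fun a => PySem.Chars.isIn a wt) then true
      else hanLoopA t term acts w f (idx + (term.length : Int))

def has_action_near_py (text : String) (term : String) (actions : List String) (window : Int) : Bool :=
  hanLoopA text.toList term.toList (actions.map String.toList) window (text.toList.length + 1) 0

-- ===== PORT B =====
-- Source B's inner 'p = text.find(action); while p != -1: …' producing (start, end) spans
-- (fuel is again only a totality guard)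
def occLoop (t a : List Char) : Nat → Int → List (Int × Int)
  | 0, _ => []
  | f + 1, p =>
    if p = -1 then []
    else (p, p + (a.length : Int)) :: occLoop t a f (PySem.Chars.findFrom t a (p + 1) none)

def occList (t a : List Char) : List (Int × Int) :=
  occLoop t a (t.length + 1) (PySem.Chars.find t a)

-- Source B's 'while idx != -1' loop over non-overlapping term occurrences
def hanLoopB (t term : List Char) (occ : List (Int × Int)) (w : Int) : Nat → Int → Bool
  | 0, _ => false
  | f + 1, idx =>
    if idx = -1 then false
    else if occ.any (fun se => decide (idx - w ≤ se.1) && decide (se.2 ≤ idx + (term.length : Int) + w)) then true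
    else hanLoopB t term occ w f (PySem.Chars.findFrom t term (idx + (term.length : Int)) none)

def has_action_near_py_alt (text : String) (term : String) (actions : List String) (window : Int) : Bool :=
  if PySem.Chars.find text.toList term.toList = -1 then false
  else if (actions.map String.toList).any (fun a => a == []) then true
  else
    hanLoopB text.toList term.toList
      ((actions.map String.toList).foldl (fun acc a => acc ++ occList text.toList a) [])
      window (text.toList.length + 1) (PySem.Chars.find text.toList term.toList)

-- ===== PRECONDITION & SPEC =====
-- Pre_ restricts window to the nonnegative values (a proximity radius; negative windows are
-- outside the function's natural domain, and there A's computed slice end can go negative so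
-- Python wraps it to the end of the text), and for an empty term — where A's loop never
-- advances — admits exactly the inputs on which A terminates (its first window check succeeds).
def Pre_has_action_near_py (text : String) (term : String) (actions : List String) (window : Int) : Prop :=
  0 ≤ window ∧
  (term ≠ "" ∨
    ((actions.map String.toList).any (fun a =>
      PySem.Chars.isIn a (PySem.List.slice text.toList
        (some (max 0 (0 - window)))
        (some (min (text.toList.length : Int) (0 + (term.toList.length : Int) + window))))) = true))
instance (text : String) (term : String) (actions : List String) (window : Int) : Decidable (Pre_has_action_near_py text term actions window) := by unfold Pre_has_action_near_py; infer_instance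

def pvWitness_has_action_near_py : String × String × List String × Int :=
  ("do a biopsy here", "biopsy", ["do", "resect"], 5)

def Spec_has_action_near_py (text : String) (term : String) (actions : List String) (window : Int) (out : Bool) : Prop := out = has_action_near_py_alt text term actions window
instance (text : String) (term : String) (actions : List String) (window : Int) (out : Bool) : Decidable (Spec_has_action_near_py text term actions window out) := by unfold Spec_has_action_near_py; infer_instance

-- ===== CLAIM (what is proved, stated in full; the proofs are below) =====
def Claim_equal_has_action_near_py : Prop := ∀ (text : String) (term : String) (actions : List String) (window : Int), Dom_has_action_near_py text term actions window → Pre_has_action_near_py text term actions window → Spec_has_action_near_py text term actions window (has_action_near_py text term actions window)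

-- ===== LEMMAS AND PROOFS =====

theorem infix_drop_iff (a t : List Char) (k : Nat) :
    a <:+: t.drop k ↔ ∃ j : Nat, k ≤ j ∧ a <+: t.drop j := by
  rw [← PySem.Chars.isIn_iff_infix, ← PySem.Chars.exists_prefix_drop_iff_isIn]
  constructor
  · rintro ⟨j, hj⟩
    exact ⟨k + j, by omega, by rwa [List.drop_drop] at hj⟩
  · rintro ⟨j, hkj, hj⟩
    refine ⟨j - k, ?_⟩
    rw [List.drop_drop, Nat.add_sub_cancel' hkj]
    exact hj

theorem occLoop_mem (t a : List Char) (ha : a ≠ []) :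
    ∀ (f : Nat) (k : Nat), k ≤ t.length → t.length - k < f →
      ∀ x : Int × Int, x ∈ occLoop t a f (PySem.Chars.findFrom t a (k : Int) none) ↔
        (0 ≤ x.1 ∧ k ≤ x.1.toNat ∧ a <+: t.drop x.1.toNat ∧ x.2 = x.1 + (a.length : Int)) := by
  intro f
  induction f with
  | zero => intro k hk hf; omega
  | succ f ih =>
    intro k hk hf x
    by_cases hneg : PySem.Chars.findFrom t a (k : Int) none = -1
    · rw [occLoop, if_pos hneg]
      simp only [List.not_mem_nil, false_iff]
      rintro ⟨hx0, hkx, hpre, _⟩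
      have : a <:+: t.drop k := (infix_drop_iff a t k).2 ⟨x.1.toNat, hkx, hpre⟩
      exact ((PySem.Chars.findFrom_natCast_eq_neg_one_iff t a k hk).1 hneg) this
    · obtain ⟨hkr, hpre, hmin⟩ := PySem.Chars.findFrom_natCast_spec t a k hk hneg
      set r := PySem.Chars.findFrom t a (k : Int) none with hr
      have hr0 : 0 ≤ r := le_trans (by exact_mod_cast Nat.zero_le k) hkr
      have hlen : a.length ≤ t.length - r.toNat := by
        have := hpre.length_le
        simpa [List.length_drop] using this
      have halen : 1 ≤ a.length := by
        cases a with
        | nil => exact absurd rfl ha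
        | cons c cs => simp
      have hrlt : r.toNat < t.length := by omega
      have hcast : r + 1 = ((r.toNat + 1 : Nat) : Int) := by push_cast; omega
      rw [occLoop, if_neg hneg, hcast]
      have hrec := ih (r.toNat + 1) (by omega) (by
        have : k ≤ r.toNat := by omega
        omega) x
      rw [List.mem_cons, hrec]
      constructor
      · rintro (rfl | ⟨hx0, hkx, hp, he⟩)
        · exact ⟨hr0, by omega, hpre, rfl⟩
        · exact ⟨hx0, by omega, hp, he⟩
      · rintro ⟨hx0, hkx, hp, he⟩
        rcases lt_trichotomy x.1.toNat r.toNat with h | h | h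
        · exact absurd hp (hmin x.1.toNat hkx h)
        · left
          have h1 : x.1 = r := by omega
          obtain ⟨x1, x2⟩ := x
          simp only at h1 he ⊢
          rw [h1] at he ⊢
          rw [he]
        · right; exact ⟨hx0, by omega, hp, he⟩

theorem occList_mem (t a : List Char) (ha : a ≠ []) (x : Int × Int) :
    x ∈ occList t a ↔ (0 ≤ x.1 ∧ a <+: t.drop x.1.toNat ∧ x.2 = x.1 + (a.length : Int)) := by
  have h := occLoop_mem t a ha (t.length + 1) 0 (Nat.zero_le _) (by omega) x
  rw [Nat.cast_zero, PySem.Chars.findFrom_zero] at h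
  unfold occList
  rw [h]
  constructor
  · rintro ⟨h1, _, h3, h4⟩; exact ⟨h1, h3, h4⟩
  · rintro ⟨h1, h3, h4⟩; exact ⟨h1, Nat.zero_le _, h3, h4⟩

theorem win_eq (t a : List Char) (ha : a ≠ []) (lo hi : Int) (hhi : 0 ≤ hi) :
    PySem.Chars.isIn a (PySem.List.slice t (some (max 0 lo)) (some (min (t.length : Int) hi))) =
      (occList t a).any (fun se => decide (lo ≤ se.1) && decide (se.2 ≤ hi)) := by
  have halen : 1 ≤ a.length := by
    cases a with
    | nil => exact absurd rfl ha
    | cons c cs => simp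
  have h0 : (0 : Int) ≤ max 0 lo := le_max_left _ _
  have h1 : (0 : Int) ≤ min (t.length : Int) hi := le_min (by positivity) hhi
  rw [PySem.List.slice_toNat t h0 h1]
  set L := (max 0 lo).toNat with hLdef
  set H := (min (t.length : Int) hi).toNat with hHdef
  have hLe : (L : Int) = max 0 lo := Int.toNat_of_nonneg h0
  have hHe : (H : Int) = min (t.length : Int) hi := Int.toNat_of_nonneg h1
  have hLlo : lo ≤ (L : Int) := by rw [hLe]; exact le_max_right _ _
  have hHhi : (H : Int) ≤ hi := by rw [hHe]; exact min_le_right _ _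
  rw [Bool.eq_iff_iff, List.any_eq_true, ← PySem.Chars.exists_prefix_drop_iff_isIn]
  constructor
  · rintro ⟨j, hj⟩
    rw [List.drop_take, List.drop_drop] at hj
    have hfit := List.prefix_take_iff.1 hj
    refine ⟨(((L + j : Nat) : Int), ((L + j : Nat) : Int) + (a.length : Int)), ?_, ?_⟩
    · rw [occList_mem t a ha]
      exact ⟨by positivity, by simpa using hfit.1, rfl⟩
    · simp only [Bool.and_eq_true, decide_eq_true_iff]
      have h2 := hfit.2
      constructor
      · push_cast; omega
      · push_cast at hHhi ⊢; omega
  · rintro ⟨se, hmem, hcond⟩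
    rw [occList_mem t a ha] at hmem
    obtain ⟨hp0, hpre, he⟩ := hmem
    simp only [Bool.and_eq_true, decide_eq_true_iff] at hcond
    obtain ⟨hLp, hpH⟩ := hcond
    have hfitlen : a.length ≤ t.length - se.1.toNat := by
      have := hpre.length_le
      simpa [List.length_drop] using this
    have hLub : (L : Int) ≤ se.1 := by rw [hLe]; exact max_le hp0 hLp
    have hHlb : se.1 + (a.length : Int) ≤ (H : Int) := by
      rw [hHe]
      refine le_min ?_ ?_
      · have hplt : se.1.toNat + a.length ≤ t.length := by omega
        omega
      · omega
    refine ⟨se.1.toNat - L, ?_⟩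
    rw [List.drop_take, List.drop_drop, List.prefix_take_iff]
    have hLp' : L ≤ se.1.toNat := by omega
    constructor
    · have heq : L + (se.1.toNat - L) = se.1.toNat := by omega
      rw [heq]; exact hpre
    · omega

theorem check_eq (t : List Char) (acts : List (List Char)) (hne : ∀ a ∈ acts, a ≠ [])
    (lo hi : Int) (hhi : 0 ≤ hi) :
    (acts.any fun a => PySem.Chars.isIn a
        (PySem.List.slice t (some (max 0 lo)) (some (min (t.length : Int) hi)))) =
      (acts.foldl (fun acc a => acc ++ occList t a) []).any
        (fun se => decide (lo ≤ se.1) && decide (se.2 ≤ hi)) := by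
  rw [PySem.List.foldl_append_eq_flatMap, List.nil_append]
  rw [Bool.eq_iff_iff, List.any_eq_true, List.any_eq_true]
  constructor
  · rintro ⟨a, ha, hin⟩
    rw [win_eq t a (hne a ha) lo hi hhi, List.any_eq_true] at hin
    obtain ⟨se, hse, hp⟩ := hin
    exact ⟨se, List.mem_flatMap.2 ⟨a, ha, hse⟩, hp⟩
  · rintro ⟨se, hse, hp⟩
    obtain ⟨a, ha, hse'⟩ := List.mem_flatMap.1 hse
    refine ⟨a, ha, ?_⟩
    rw [win_eq t a (hne a ha) lo hi hhi, List.any_eq_true]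
    exact ⟨se, hse', hp⟩

theorem loop_eq (t term : List Char) (acts : List (List Char)) (w : Int)
    (hterm : term ≠ []) (hne : ∀ a ∈ acts, a ≠ []) (hw : 0 ≤ w) :
    ∀ (f : Nat) (k : Nat), k ≤ t.length →
      hanLoopB t term (acts.foldl (fun acc a => acc ++ occList t a) []) w f
          (PySem.Chars.findFrom t term (k : Int) none) =
        hanLoopA t term acts w f (k : Int) := by
  intro f
  induction f with
  | zero => intro k hk; rfl
  | succ f ih =>
    intro k hk
    rw [hanLoopA, hanLoopB]
    by_cases hne' : PySem.Chars.findFrom t term (k : Int) none = -1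
    · rw [if_pos hne', if_pos hne']
    · obtain ⟨hki, hpre, _⟩ := PySem.Chars.findFrom_natCast_spec t term k hk hne'
      set idx := PySem.Chars.findFrom t term (k : Int) none with hidx
      have hidx0 : 0 ≤ idx := le_trans (by exact_mod_cast Nat.zero_le k) hki
      have h1len : 1 ≤ term.length := by
        cases term with
        | nil => exact absurd rfl hterm
        | cons c cs => simp
      have hlen : term.length ≤ t.length - idx.toNat := by
        simpa [List.length_drop] using hpre.length_le
      have hnext : idx.toNat + term.length ≤ t.length := by omega
      rw [if_neg hne', if_neg hne']
      simp only
      rw [← check_eq t acts hne (idx - w) (idx + (term.length : Int) + w)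
        (by omega)]
      refine if_congr Iff.rfl rfl ?_
      have hcast : idx + (term.length : Int) = ((idx.toNat + term.length : Nat) : Int) := by
        push_cast; omega
      rw [hcast]
      exact ih (idx.toNat + term.length) hnext

-- ===== VERDICT (by name: the statement is the Claim_ definition above) =====
theorem has_action_near_py_spec : Claim_equal_has_action_near_py := by
  intro text term actions window _ hpre
  obtain ⟨hw, hpre⟩ := hpre
  unfold Spec_has_action_near_py has_action_near_py has_action_near_py_alt
  by_cases hfind : PySem.Chars.find text.toList term.toList = -1
  · -- the term never occurs: A's first find fails, B bails out up front
    rw [if_pos hfind, hanLoopA]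
    simp only [PySem.Chars.findFrom_zero]
    rw [if_pos hfind]
  · rw [if_neg hfind]
    by_cases hemp : ((actions.map String.toList).any (fun a => a == [])) = true
    · -- some action is "": it occurs in the first term occurrence's window, so A returns True
      rw [if_pos hemp]
      obtain ⟨a, ha, haeq⟩ := List.any_eq_true.1 hemp
      have ha0 : a = [] := by simpa using haeq
      subst ha0
      rw [hanLoopA]
      simp only [PySem.Chars.findFrom_zero]
      rw [if_neg hfind]
      have hany : ((actions.map String.toList).any fun a => PySem.Chars.isIn a
          (PySem.List.slice text.toList
            (some (max 0 (PySem.Chars.find text.toList term.toList - window)))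
            (some (min (text.toList.length : Int)
              (PySem.Chars.find text.toList term.toList + (term.toList.length : Int) + window))))) = true := by
        rw [List.any_eq_true]
        exact ⟨[], ha, PySem.Chars.isIn_nil _⟩
      simp only [hany, if_true]
    · rw [if_neg hemp]
      have hempf : ((actions.map String.toList).any (fun a => a == [])) = false := by
        revert hemp
        cases ((actions.map String.toList).any (fun a => a == [])) <;> simp
      have hne : ∀ a ∈ actions.map String.toList, a ≠ [] := by
        intro a ha h
        rw [List.any_eq_false] at hempf
        exact absurd (by simp [h] : (a == []) = true) (by simpa using hempf a ha)
      by_cases hterm : term = ""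
      · -- empty term: Pre_ guarantees an action occurs in the initial window, so both
        -- loops return True at their first iteration (term occurrence index 0)
        have hc := hpre.resolve_left (fun h => h hterm)
        subst hterm
        have hnil : ("" : String).toList = [] := rfl
        rw [hnil] at hc ⊢
        have hfind0 : PySem.Chars.find text.toList [] = 0 := PySem.Chars.find_nil _
        rw [hanLoopA, hanLoopB]
        simp only [PySem.Chars.findFrom_zero, hfind0]
        rw [if_neg (by norm_num : ¬((0 : Int) = -1)), if_neg (by norm_num : ¬((0 : Int) = -1))]
        rw [← check_eq text.toList (actions.map String.toList) hne
          (0 - window) (0 + (([] : List Char).length : Int) + window)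
          (by simp; omega)] at *
        simp only [hc, if_true]
      · rw [← PySem.Chars.findFrom_zero]
        have h0 : ((0 : Nat) : Int) = (0 : Int) := by norm_num
        rw [← h0]
        exact (loop_eq text.toList term.toList (actions.map String.toList) window
          (by simpa using hterm) hne hw (text.toList.length + 1) 0 (Nat.zero_le _)).symm
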